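-- pv_equiv track=rewrite | github.com/Spar7k/LinguaSub-demo | backend/app/agent_service.py | _has_unbalanced_json_delimiters
-- ===== SOURCE A (Python) =====
-- def _has_unbalanced_json_delimiters(content: str) -> bool:
--     stack: list[str] = []
--     in_string = False
--     escape_next = False
--     pairs = {"}": "{", "]": "["}
--
--     for char in content:
--         if escape_next:
--             escape_next = False
--             continue
--
--         if char == "\\":
--             escape_next = True
--             continue
--
--         if char == '"':
--             in_string = not in_string
--             continue
--
--         if in_string:
--             continue
--
--         if char in "{[":
--             stack.append(char)
--             continue
--
--         if char in pairs:
--             if not stack or stack[-1] != pairs[char]: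
--                 return True
--             stack.pop()
--
--     return in_string or bool(stack)
-- ===== SOURCE B (Python) =====
-- def _has_unbalanced_json_delimiters(content: str) -> bool:
--     # Pass 1: index scan; a backslash skips the next character (even outside
--     # strings, matching the source's escape rule); collect structural brackets
--     # that occur outside strings.
--     brackets = []
--     in_string = False
--     i = 0
--     n = len(content)
--     while i < n:
--         c = content[i]
--         if c == "\\":
--             i += 2
--             continue
--         if c == '"':
--             in_string = not in_string
--         elif not in_string and c in "{[]}":
--             brackets.append(c)
--         i += 1
--
--     # Pass 2: repeatedly cancel adjacent matched pairs "{}" / "[]" until a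
--     # fixed point; the bracket sequence is balanced iff nothing remains.
--     while True:
--         reduced = _cancel_once(brackets)
--         if reduced == brackets:
--             break
--         brackets = reduced
--
--     return in_string or bool(brackets)
--
--
-- def _cancel_once(s):
--     out = []
--     j = 0
--     while j < len(s):
--         if j + 1 < len(s) and ((s[j] == "{" and s[j + 1] == "}") or (s[j] == "[" and s[j + 1] == "]")):
--             j += 2
--         else:
--             out.append(s[j])
--             j += 1
--     return out
-- ===== Notes on version B (the rewrite author's own statement) =====
-- stated objective: alternative
-- what changed: Replaces the inline early-return bracket stack with a two-phase design: an index-based scan (a backslash skips the next index) extracts the outside-string bracket sequence, then a rewriting pass repeatedly cancels adjacent matched open/close pairs to a fixed point and reports unbalanced iff anything remains or the scan ended inside a string.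
import Mathlib
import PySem

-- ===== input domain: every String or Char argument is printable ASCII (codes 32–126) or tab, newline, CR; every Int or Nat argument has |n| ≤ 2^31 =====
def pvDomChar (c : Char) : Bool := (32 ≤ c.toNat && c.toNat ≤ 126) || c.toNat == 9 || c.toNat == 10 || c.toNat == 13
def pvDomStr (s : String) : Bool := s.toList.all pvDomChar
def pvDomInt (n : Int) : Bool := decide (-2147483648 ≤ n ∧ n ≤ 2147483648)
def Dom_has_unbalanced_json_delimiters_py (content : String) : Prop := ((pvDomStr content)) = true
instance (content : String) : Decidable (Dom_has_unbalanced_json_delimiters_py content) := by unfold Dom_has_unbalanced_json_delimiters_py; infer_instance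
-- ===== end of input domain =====

-- B replaces A's inline early-return bracket stack with a two-phase design (extract the
-- outside-string bracket sequence, then cancel adjacent matched pairs to a fixed point);
-- objective: alternative (same result, no speed claim).

-- ===== PORT A =====
-- pairs = {"}": "{", "]": "["}
def pairsA : PySem.Dict Char Char := PySem.Dict.ofList [('}', '{'), (']', '[')]

-- the for-loop of A: state (stack, in_string, escape_next); early `return True` yields `true`
def loopA : List Char → List Char → Bool → Bool → Bool
  | [], stack, instr, _esc => instr || !stack.isEmpty
  | c :: cs, stack, instr, esc =>
    if esc then loopA cs stack instr false
    else if c = '\\' then loopA cs stack instr true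
    else if c = '"' then loopA cs stack (!instr) esc
    else if instr then loopA cs stack instr esc
    else if c = '{' ∨ c = '[' then loopA cs (c :: stack) instr esc
    else if (PySem.Dict.get? pairsA c).isSome then
      match stack with
      | [] => true
      | t :: rest => if t ≠ PySem.Dict.getD pairsA c ' ' then true else loopA cs rest instr esc
    else loopA cs stack instr esc

def has_unbalanced_json_delimiters_py (content : String) : Bool :=
  loopA content.toList [] false false

-- ===== PORT B =====
-- pass 1 of Source B: index scan, backslash skips the next index, collect outside-string brackets
def scanB : List Char → Bool → (List Char × Bool)
  | [], instr => ([], instr)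
  | c :: cs, instr =>
    if c = '\\' then scanB (cs.drop 1) instr
    else if c = '"' then scanB cs (!instr)
    else if instr = false ∧ (c = '{' ∨ c = '[' ∨ c = ']' ∨ c = '}') then
      let p := scanB cs instr
      (c :: p.1, p.2)
    else scanB cs instr
termination_by l _ => l.length
decreasing_by
  all_goals simp

-- the pair test of _cancel_once
def isPair (a b : Char) : Bool := (a == '{' && b == '}') || (a == '[' && b == ']')

-- _cancel_once of Source B: one left-to-right pass removing adjacent matched pairs
def cancelOnce : List Char → List Char
  | a :: b :: rest =>
    if isPair a b then cancelOnce rest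
    else a :: cancelOnce (b :: rest)
  | l => l

-- length facts the fixed-point loop's termination needs
theorem cancelOnce_length_le : ∀ l : List Char, (cancelOnce l).length ≤ l.length := by
  intro l
  induction l using cancelOnce.induct with
  | case1 a b rest h ih => simp [cancelOnce, h] at *; omega
  | case2 a b rest h ih => simp [cancelOnce, h] at *; omega
  | case3 l _ => simp [cancelOnce]

theorem cancelOnce_lt_of_ne : ∀ (l : List Char), cancelOnce l ≠ l →
    (cancelOnce l).length < l.length := by
  intro l
  induction l using cancelOnce.induct with
  | case1 a b rest h ih =>
    intro _
    have := cancelOnce_length_le rest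
    simp [cancelOnce, h]; omega
  | case2 a b rest h ih =>
    intro hne
    have h2 : cancelOnce (b :: rest) ≠ b :: rest := by
      intro he; apply hne; simp [cancelOnce, h, he]
    have := ih h2
    simp at this
    simp [cancelOnce, h]; omega
  | case3 l h1 => intro hne; cases l with
    | nil => simp [cancelOnce] at hne
    | cons a t => cases t with
      | nil => simp [cancelOnce] at hne
      | cons b r => exact absurd rfl (h1 a b r)

-- the `while True` fixed-point loop of Source B
def reduceFix (l : List Char) : List Char :=
  let r := cancelOnce l
  if h : r = l then l else reduceFix r
termination_by l.length
decreasing_by exact cancelOnce_lt_of_ne l h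

def has_unbalanced_json_delimiters_py_alt (content : String) : Bool :=
  let p := scanB content.toList false
  p.2 || !(reduceFix p.1).isEmpty

-- ===== PRECONDITION & SPEC =====
def Spec_has_unbalanced_json_delimiters_py (content : String) (out : Bool) : Prop := out = has_unbalanced_json_delimiters_py_alt content
instance (content : String) (out : Bool) : Decidable (Spec_has_unbalanced_json_delimiters_py content out) := by unfold Spec_has_unbalanced_json_delimiters_py; infer_instance

-- ===== CLAIM (what is proved, stated in full; the proofs are below) =====
def Claim_equal_has_unbalanced_json_delimiters_py : Prop := ∀ (content : String), Dom_has_unbalanced_json_delimiters_py content → Spec_has_unbalanced_json_delimiters_py content (has_unbalanced_json_delimiters_py content)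

-- ===== LEMMAS AND PROOFS =====

-- bracket characters
def isB (c : Char) : Bool := c == '{' || c == '[' || c == '}' || c == ']'

-- abstract early-return stack run over a pure bracket sequence
def runA : List Char → List Char → Option (List Char)
  | [], st => some st
  | c :: cs, st =>
    if c = '{' ∨ c = '[' then runA cs (c :: st)
    else if c = '}' ∨ c = ']' then
      match st with
      | [] => none
      | t :: r => if t = (if c = '}' then '{' else '[') then runA cs r else none
    else runA cs st

-- adjacent matched pair exists
def hasPair : List Char → Bool
  | a :: b :: rest => isPair a b || hasPair (b :: rest)
  | _ => false

theorem runA_cancelOnce : ∀ (l : List Char) (st : List Char),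
    runA (cancelOnce l) st = runA l st := by
  intro l
  induction l using cancelOnce.induct with
  | case1 a b rest h ih =>
    intro st
    have hab : (a = '{' ∧ b = '}') ∨ (a = '[' ∧ b = ']') := by
      simp [isPair] at h; tauto
    rcases hab with ⟨ha, hb⟩ | ⟨ha, hb⟩ <;> subst ha <;> subst hb <;>
      simp [cancelOnce, h, runA, ih]
  | case2 a b rest h ih =>
    intro st
    by_cases h1 : a = '{' ∨ a = '['
    · simp [cancelOnce, h, runA, h1, ih]
    · by_cases h2 : a = '}' ∨ a = ']'
      · cases st with
        | nil => simp [cancelOnce, h, runA, h1, h2]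
        | cons t r =>
          by_cases h3 : t = (if a = '}' then '{' else '[')
          · simp [cancelOnce, h, runA, h1, h2, h3, ih]
          · simp [cancelOnce, h, runA, h1, h2, h3]
      · simp [cancelOnce, h, runA, h1, h2, ih]
  | case3 l h1 => intro st; cases l with
    | nil => simp [cancelOnce]
    | cons a t => cases t with
      | nil => simp [cancelOnce]
      | cons b r => exact absurd rfl (h1 a b r)

theorem reduceFix_eq_of_ne (l : List Char) (h : cancelOnce l ≠ l) :
    reduceFix l = reduceFix (cancelOnce l) := by
  rw [reduceFix]; simp [h]

theorem reduceFix_eq_of_fix (l : List Char) (h : cancelOnce l = l) :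
    reduceFix l = l := by
  rw [reduceFix]; simp [h]

theorem runA_reduceFix : ∀ (l : List Char) (st : List Char),
    runA (reduceFix l) st = runA l st := by
  intro l
  induction l using reduceFix.induct with
  | case1 l r h => intro st; rw [reduceFix_eq_of_fix l h]
  | case2 l r h ih =>
    intro st
    rw [reduceFix_eq_of_ne l h, ih, runA_cancelOnce]

theorem cancelOnce_reduceFix (l : List Char) : cancelOnce (reduceFix l) = reduceFix l := by
  induction l using reduceFix.induct with
  | case1 l r h => rw [reduceFix_eq_of_fix l h]; exact h
  | case2 l r h ih => rw [reduceFix_eq_of_ne l h]; exact ih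

theorem mem_cancelOnce (x : Char) : ∀ (l : List Char), x ∈ cancelOnce l → x ∈ l := by
  intro l
  induction l using cancelOnce.induct with
  | case1 a b rest h ih =>
    intro hm; simp [cancelOnce, h] at hm
    simp [List.mem_cons, ih hm]
  | case2 a b rest h ih =>
    intro hm; simp [cancelOnce, h] at hm
    rcases hm with rfl | hm
    · simp
    · have := ih hm; simp [List.mem_cons] at this ⊢; tauto
  | case3 l h1 => intro hm; cases l with
    | nil => simpa [cancelOnce] using hm
    | cons a t => cases t with
      | nil => simpa [cancelOnce] using hm
      | cons b r => exact absurd rfl (h1 a b r)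

theorem mem_reduceFix (x : Char) : ∀ (l : List Char), x ∈ reduceFix l → x ∈ l := by
  intro l
  induction l using reduceFix.induct with
  | case1 l r h => rw [reduceFix_eq_of_fix l h]; exact fun h => h
  | case2 l r h ih =>
    rw [reduceFix_eq_of_ne l h]
    intro hm; exact mem_cancelOnce x l (ih hm)

theorem hasPair_of_fix : ∀ l : List Char, cancelOnce l = l → hasPair l = false := by
  intro l
  induction l using cancelOnce.induct with
  | case1 a b rest h ih =>
    intro hf; exfalso
    have hle := cancelOnce_length_le rest
    simp [cancelOnce, h] at hf
    have := congrArg List.length hf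
    simp at this; omega
  | case2 a b rest h ih =>
    intro hf; simp [cancelOnce, h] at hf
    simp [hasPair, h, ih hf]
  | case3 l h1 => intro _; cases l with
    | nil => simp [hasPair]
    | cons a t => cases t with
      | nil => simp [hasPair]
      | cons b r => exact absurd rfl (h1 a b r)

theorem runA_some_nil : ∀ (m : List Char), (∀ x ∈ m, isB x = true) → ∀ st, runA m st = some [] →
    m = [] ∨ hasPair m = true ∨ (∃ c t, m = c :: t ∧ (c = '}' ∨ c = ']')) := by
  intro m
  induction m with
  | nil => intro _ _ _; exact Or.inl rfl
  | cons a rest ih =>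
    intro hb st hr
    by_cases h2 : a = '}' ∨ a = ']'
    · exact Or.inr (Or.inr ⟨a, rest, rfl, h2⟩)
    · have h1 : a = '{' ∨ a = '[' := by
        have := hb a (List.mem_cons_self ..); simp [isB] at this; tauto
      simp only [runA] at hr
      rw [if_pos h1] at hr
      have hbr : ∀ x ∈ rest, isB x = true := fun x hx => hb x (List.mem_cons_of_mem _ hx)
      rcases ih hbr (a :: st) hr with hnil | hp | ⟨c, t, hct, hc⟩
      · subst hnil; simp [runA] at hr
      · right; left
        cases rest with
        | nil => simp [hasPair] at hp
        | cons b t => simp [hasPair] at hp ⊢; tauto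
      · subst hct
        right; left
        have hno : ¬ (c = '{' ∨ c = '[') := by rcases hc with rfl | rfl <;> simp
        simp only [runA] at hr
        rw [if_neg hno, if_pos hc] at hr
        by_cases h3 : a = (if c = '}' then '{' else '[')
        · simp only [hasPair, Bool.or_eq_true]
          left
          rcases hc with rfl | rfl <;> simp at h3 <;> simp [isPair, h3]
        · simp [h3] at hr

theorem reduceFix_nil_iff (bs : List Char) (hb : ∀ x ∈ bs, isB x = true) :
    reduceFix bs = [] ↔ runA bs [] = some [] := by
  constructor
  · intro h
    have h2 := runA_reduceFix bs []
    rw [h] at h2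
    simpa [runA] using h2.symm
  · intro h
    have hfix := cancelOnce_reduceFix bs
    have hmem : ∀ x ∈ reduceFix bs, isB x = true := fun x hx => hb x (mem_reduceFix x bs hx)
    have hrun : runA (reduceFix bs) [] = some [] := by rw [runA_reduceFix]; exact h
    rcases runA_some_nil _ hmem [] hrun with h0 | hp | ⟨c, t, hct, hc⟩
    · exact h0
    · rw [hasPair_of_fix _ hfix] at hp; cases hp
    · rw [hct] at hrun
      rcases hc with rfl | rfl <;> simp [runA] at hrun

theorem scanB_isB : ∀ (n : Nat) (cs : List Char) (instr : Bool), cs.length ≤ n →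
    ∀ x ∈ (scanB cs instr).1, isB x = true := by
  intro n
  induction n with
  | zero =>
    intro cs instr hlen
    have : cs = [] := by cases cs <;> simp_all
    subst this; simp [scanB]
  | succ n ih =>
    intro cs instr hlen
    cases cs with
    | nil => simp [scanB]
    | cons c cs =>
      simp at hlen
      by_cases hb1 : c = '\\'
      · rw [scanB, if_pos hb1]
        exact ih (cs.drop 1) instr (by simp; omega)
      · by_cases hb2 : c = '"'
        · rw [scanB, if_neg hb1, if_pos hb2]
          exact ih cs (!instr) hlen
        · by_cases hb3 : instr = false ∧ (c = '{' ∨ c = '[' ∨ c = ']' ∨ c = '}')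
          · rw [scanB, if_neg hb1, if_neg hb2, if_pos hb3]
            intro x hx
            simp at hx
            rcases hx with rfl | hx
            · rcases hb3.2 with rfl | rfl | rfl | rfl <;> simp [isB]
            · exact ih cs instr hlen x hx
          · rw [scanB, if_neg hb1, if_neg hb2, if_neg hb3]
            exact ih cs instr hlen

theorem pairs_get (c : Char) : PySem.Dict.get? pairsA c =
    if c = '}' then some '{' else if c = ']' then some '[' else none := by
  have h : pairsA = PySem.Dict.mk [('}', '{'), (']', '[')] := by decide
  rw [h, PySem.Dict.get?_mk_cons, PySem.Dict.get?_mk_cons]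
  have h0 : (PySem.Dict.mk ([] : List (Char × Char))).get? c = none := by simp [PySem.Dict.get?]
  rw [h0]
  by_cases h1 : c = '}' <;> by_cases h2 : c = ']' <;> simp_all <;> simp [h1, h2, Ne.symm]

theorem scan_eq : ∀ (n : Nat) (cs : List Char), cs.length ≤ n → ∀ (st : List Char) (instr : Bool),
    loopA cs st instr false =
      (match runA (scanB cs instr).1 st with
       | none => true
       | some st' => (scanB cs instr).2 || !st'.isEmpty) := by
  intro n
  induction n with
  | zero =>
    intro cs hlen st instr
    have : cs = [] := by cases cs <;> simp_all
    subst this; simp [scanB, loopA, runA]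
  | succ n ih =>
    intro cs hlen st instr
    cases cs with
    | nil => simp [scanB, loopA, runA]
    | cons c cs =>
      simp at hlen
      by_cases hb1 : c = '\\'
      · subst hb1
        rw [scanB]
        simp only [if_pos rfl]
        cases cs with
        | nil => simp [loopA, scanB, runA]
        | cons d cs2 =>
          have hL : loopA ('\\' :: d :: cs2) st instr false = loopA cs2 st instr false := by
            simp [loopA]
          rw [hL]
          simpa using ih cs2 (by simp at hlen ⊢; omega) st instr
      · by_cases hb2 : c = '"'
        · subst hb2
          have hL : loopA ('"' :: cs) st instr false = loopA cs st (!instr) false := by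
            simp [loopA]
          rw [hL, scanB]
          simp only [if_neg (show ¬('"' : Char) = '\\' by decide)]
          exact ih cs hlen st (!instr)
        · by_cases hin : instr = true
          · subst hin
            have hL : loopA (c :: cs) st true false = loopA cs st true false := by
              simp [loopA, hb1, hb2]
            have hc3 : ¬ ((true : Bool) = false ∧ (c = '{' ∨ c = '[' ∨ c = ']' ∨ c = '}')) := by simp
            rw [hL, scanB, if_neg hb1, if_neg hb2, if_neg hc3]
            exact ih cs hlen st true
          · have hin' : instr = false := by simpa using hin
            subst hin'
            by_cases hop : c = '{' ∨ c = '['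
            · have hc3 : (false : Bool) = false ∧ (c = '{' ∨ c = '[' ∨ c = ']' ∨ c = '}') := by tauto
              rw [scanB, if_neg hb1, if_neg hb2, if_pos hc3]
              have hL : loopA (c :: cs) st false false = loopA cs (c :: st) false false := by
                simp [loopA, hb1, hb2, hop]
              rw [hL]
              have hR : runA (c :: (scanB cs false).1) st = runA (scanB cs false).1 (c :: st) := by
                simp only [runA]; rw [if_pos hop]
              simp only [hR]
              exact ih cs hlen (c :: st) false
            · by_cases hcl : c = '}' ∨ c = ']'
              · have hc3 : (false : Bool) = false ∧ (c = '{' ∨ c = '[' ∨ c = ']' ∨ c = '}') := by tauto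
                rw [scanB, if_neg hb1, if_neg hb2, if_pos hc3]
                have hget : (PySem.Dict.get? pairsA c).isSome = true := by
                  rw [pairs_get]; rcases hcl with rfl | rfl <;> simp
                have hgetD : PySem.Dict.getD pairsA c ' ' = (if c = '}' then '{' else '[') := by
                  rw [PySem.Dict.getD_eq_get?_getD, pairs_get]
                  rcases hcl with rfl | rfl <;> simp
                cases st with
                | nil =>
                  have hL : loopA (c :: cs) [] false false = true := by
                    simp [loopA, hb1, hb2, hop, hget]
                  rw [hL]
                  simp only [runA]
                  rw [if_neg hop, if_pos hcl]
                | cons t r =>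
                  by_cases h3 : t = (if c = '}' then '{' else '[')
                  · have hL : loopA (c :: cs) (t :: r) false false = loopA cs r false false := by
                      simp [loopA, hb1, hb2, hop, hget, hgetD, h3]
                    have hR : runA (c :: (scanB cs false).1) (t :: r) = runA (scanB cs false).1 r := by
                      simp only [runA]; rw [if_neg hop, if_pos hcl]; simp [h3]
                    rw [hL]
                    simp only [hR]
                    exact ih cs hlen r false
                  · have hL : loopA (c :: cs) (t :: r) false false = true := by
                      simp [loopA, hb1, hb2, hop, hget, hgetD, h3]
                    have hR : runA (c :: (scanB cs false).1) (t :: r) = none := by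
                      simp only [runA]; rw [if_neg hop, if_pos hcl]; simp [h3]
                    rw [hL]
                    simp only [hR]
              · have hc3 : ¬ ((false : Bool) = false ∧ (c = '{' ∨ c = '[' ∨ c = ']' ∨ c = '}')) := by
                  simp
                  exact ⟨fun h => hop (Or.inl h), fun h => hop (Or.inr h),
                         fun h => hcl (Or.inr h), fun h => hcl (Or.inl h)⟩
                rw [scanB, if_neg hb1, if_neg hb2, if_neg hc3]
                have hget : (PySem.Dict.get? pairsA c).isSome = false := by
                  rw [pairs_get]
                  have hx : ¬ c = '}' := fun h => hcl (Or.inl h)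
                  have hy : ¬ c = ']' := fun h => hcl (Or.inr h)
                  simp [hx, hy]
                have hL : loopA (c :: cs) st false false = loopA cs st false false := by
                  simp [loopA, hb1, hb2, hop, hget]
                rw [hL]
                exact ih cs hlen st false

-- ===== VERDICT (by name: the statement is the Claim_ definition above) =====
theorem has_unbalanced_json_delimiters_py_spec : Claim_equal_has_unbalanced_json_delimiters_py := by
  intro content _
  unfold Spec_has_unbalanced_json_delimiters_py
  unfold has_unbalanced_json_delimiters_py has_unbalanced_json_delimiters_py_alt
  have hb := scanB_isB content.toList.length content.toList false le_rfl
  rw [scan_eq content.toList.length content.toList le_rfl [] false]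
  cases hr : runA (scanB content.toList false).1 [] with
  | none =>
    have hne : reduceFix (scanB content.toList false).1 ≠ [] := by
      intro h
      rw [reduceFix_nil_iff _ hb] at h
      rw [hr] at h; cases h
    simp [hne]
  | some st =>
    cases st with
    | nil =>
      have he : reduceFix (scanB content.toList false).1 = [] := by
        rw [reduceFix_nil_iff _ hb]; exact hr
      simp [he]
    | cons t r =>
      have hne : reduceFix (scanB content.toList false).1 ≠ [] := by
        intro h
        rw [reduceFix_nil_iff _ hb] at h
        rw [hr] at h; cases h
      simp [hne]
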